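-- pv_equiv track=rewrite | github.com/eicc27/AL_ABReader | serve_pipeline.py | find_matching_rw
-- ===== SOURCE A (Python) =====
-- def find_matching_rw(props: list[list[str]]):
--     results = []
--     for i, prop in enumerate(props):
--         rw_idx = -1
--         for p in prop:
--             if "rw" in p:
--                 rw_idx = prop.index(p)
--         if rw_idx >= 0:
--             popped = prop.copy()
--             popped.pop(rw_idx)
--             for j, prop_n in enumerate(props):
--                 if popped == prop_n:
--                     results.append((i, j))
--     return results
-- ===== SOURCE B (Python) =====
-- def find_matching_rw(props: list[list[str]]):
--     # Hash-index: bucket indices by content, then look each popped prop up directly.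
--     buckets = {}
--     for j, p in enumerate(props):
--         buckets.setdefault(tuple(p), []).append(j)
--     results = []
--     for i, prop in enumerate(props):
--         target = None
--         for p in prop:
--             if "rw" in p:
--                 target = p
--         if target is not None:
--             popped = prop.copy()
--             popped.remove(target)
--             for j in buckets.get(tuple(popped), []):
--                 results.append((i, j))
--     return results
-- ===== Notes on version B (the rewrite author's own statement) =====
-- stated objective: alternative
-- what changed: B builds a hash index from prop contents to their index lists in one pass and looks the popped prop up directly, replacing A's inner linear scan of all props for every rw-prop (and tracks the last rw element directly instead of A's prop.index scan); asymptotically better on rw-heavy inputs but not measurably faster on the benchmark inputs.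
import Mathlib
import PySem

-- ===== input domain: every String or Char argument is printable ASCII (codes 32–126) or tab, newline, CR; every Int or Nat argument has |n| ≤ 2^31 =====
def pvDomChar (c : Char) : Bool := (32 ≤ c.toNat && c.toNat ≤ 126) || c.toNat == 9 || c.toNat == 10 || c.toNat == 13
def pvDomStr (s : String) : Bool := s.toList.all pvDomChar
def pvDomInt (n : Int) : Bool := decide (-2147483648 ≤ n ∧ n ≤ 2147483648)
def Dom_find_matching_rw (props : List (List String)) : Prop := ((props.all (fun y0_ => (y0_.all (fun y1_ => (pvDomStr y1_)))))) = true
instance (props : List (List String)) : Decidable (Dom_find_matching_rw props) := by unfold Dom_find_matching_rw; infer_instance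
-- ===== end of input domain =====

-- B looks each popped prop up in a hash index built in one pass, instead of A's inner scan of all props per rw-prop; objective: alternative (not measured faster on the benchmark inputs).

-- ===== PORT A =====
def find_matching_rw (props : List (List String)) : List (Int × Int) :=
  (PySem.List.enumerate props).foldl (fun results ip =>
    let i := ip.1
    let prop := ip.2
    let rw_idx : Int := prop.foldl (fun rw_idx p =>
      if PySem.Str.isIn "rw" p then
        match PySem.List.index? prop p with
        | some k => (k : Int)
        | none => rw_idx          -- unreachable: p ∈ prop, so prop.index(p) succeeds
      else rw_idx) (-1)
    if 0 ≤ rw_idx then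
      match PySem.List.pop? prop rw_idx with
      | some (_, popped) =>
        (PySem.List.enumerate props).foldl (fun results jp =>
          if popped == jp.2 then results ++ [(i, jp.1)] else results) results
      | none => results            -- unreachable: 0 ≤ rw_idx < len(prop)
    else results) []

-- ===== PORT B =====
def find_matching_rw_alt (props : List (List String)) : List (Int × Int) :=
  let buckets : PySem.Dict (List String) (List Int) :=
    (PySem.List.enumerate props).foldl
      (fun d jp => d.insert jp.2 (d.getD jp.2 [] ++ [jp.1])) PySem.Dict.empty
  (PySem.List.enumerate props).foldl (fun results ip =>
    let i := ip.1
    let prop := ip.2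
    let target : Option String :=
      prop.foldl (fun t p => if PySem.Str.isIn "rw" p then some p else t) none
    match target with
    | some tg =>
      match PySem.List.remove? prop tg with
      | some popped =>
        (buckets.getD popped []).foldl (fun results j => results ++ [(i, j)]) results
      | none => results            -- unreachable: tg ∈ prop
    | none => results) []

-- ===== PRECONDITION & SPEC =====
def Spec_find_matching_rw (props : List (List String)) (out : List (Int × Int)) : Prop := out = find_matching_rw_alt props
instance (props : List (List String)) (out : List (Int × Int)) : Decidable (Spec_find_matching_rw props out) := by unfold Spec_find_matching_rw; infer_instance

-- ===== CLAIM (what is proved, stated in full; the proofs are below) =====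
def Claim_equal_find_matching_rw : Prop := ∀ (props : List (List String)), Dom_find_matching_rw props → Spec_find_matching_rw props (find_matching_rw props)

-- ===== LEMMAS AND PROOFS =====

-- indices j (in order) whose prop equals key: what both inner loops compute
def pvMatches (l : List (Int × List String)) (key : List String) : List Int :=
  l.filterMap (fun jp => if jp.2 == key then some jp.1 else none)

-- the joint state relation of A's rw_idx loop and B's target loop
def pvInv (prop : List String) (r : Int) (t : Option String) : Prop :=
  (t = none ∧ r = -1) ∨ ∃ p k, t = some p ∧ PySem.List.index? prop p = some k ∧ r = (k : Int)

-- the hash index lists exactly the matching indices, in order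
theorem pv_bucket (l : List (Int × List String)) (d : PySem.Dict (List String) (List Int))
    (k : List String) :
    (l.foldl (fun d jp => d.insert jp.2 (d.getD jp.2 [] ++ [jp.1])) d).getD k []
      = d.getD k [] ++ pvMatches l k := by
  induction l generalizing d with
  | nil => simp [pvMatches]
  | cons jp l ih =>
    simp only [List.foldl_cons, ih, pvMatches, List.filterMap_cons]
    rw [PySem.Dict.getD_insert]
    by_cases h : k = jp.2
    · simp [h]
    · have h1 : (jp.2 == k) = false := beq_eq_false_iff_ne.mpr (Ne.symm h)
      simp [h, h1]

theorem pv_filter_map (l : List (Int × List String)) (key : List String) (i : Int) :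
    (l.filter (fun jp => key == jp.2)).map (fun jp => (i, jp.1))
      = (pvMatches l key).map (fun j => (i, j)) := by
  induction l with
  | nil => rfl
  | cons jp l ih =>
    simp only [pvMatches, List.filterMap_cons, List.filter_cons] at *
    by_cases h : jp.2 = key
    · simp [h, ih]
    · simp [beq_eq_false_iff_ne.mpr h, beq_eq_false_iff_ne.mpr (Ne.symm h), ih]

-- the two inner-state loops preserve pvInv
theorem pv_rw_inv (prop : List String) (l : List String) (hl : ∀ p ∈ l, p ∈ prop)
    (r : Int) (t : Option String) (h : pvInv prop r t) :
    pvInv prop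
      (l.foldl (fun rw_idx p =>
        if PySem.Str.isIn "rw" p then
          match PySem.List.index? prop p with
          | some k => (k : Int)
          | none => rw_idx
        else rw_idx) r)
      (l.foldl (fun t p => if PySem.Str.isIn "rw" p then some p else t) t) := by
  induction l generalizing r t with
  | nil => exact h
  | cons q l ih =>
    simp only [List.foldl_cons]
    refine ih (fun p hp => hl p (List.mem_cons_of_mem _ hp)) _ _ ?_
    cases hq : PySem.Str.isIn "rw" q with
    | false =>
      rw [if_neg (by simp), if_neg (by simp)]
      exact h
    | true =>
      rw [if_pos (by simp), if_pos (by simp)]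
      have hmem : q ∈ prop := hl q List.mem_cons_self
      obtain ⟨k, hk⟩ : ∃ k, List.idxOf? q prop = some k := by
        cases hidx : List.idxOf? q prop with
        | none => exact absurd (List.idxOf?_eq_none_iff.mp hidx) (by simpa using hmem)
        | some k => exact ⟨k, rfl⟩
      have hk' : PySem.List.index? prop q = some k := hk
      rw [hk']
      exact Or.inr ⟨q, k, rfl, hk', rfl⟩

-- ===== VERDICT (by name: the statement is the Claim_ definition above) =====
theorem find_matching_rw_spec : Claim_equal_find_matching_rw := by
  intro props _
  unfold Spec_find_matching_rw find_matching_rw find_matching_rw_alt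
  rw [List.foldl_ext]
  intro res ip _
  have hinv := pv_rw_inv ip.2 ip.2 (fun p hp => hp) (-1) none (Or.inl ⟨rfl, rfl⟩)
  rcases hinv with ⟨ht, hr⟩ | ⟨p, k, ht, hk, hr⟩
  · simp only [ht, hr]
    norm_num
  · simp only [ht, hr]
    have hklen : k < ip.2.length := (List.idxOf?_eq_some_iff.mp hk).1
    have hpop : PySem.List.pop? ip.2 (k : Int) = some (ip.2[k], ip.2.eraseIdx k) := by
      simp [PySem.List.pop?, PySem.List.pyIdx?, hklen]
    have hk2 : List.idxOf? p ip.2 = some k := hk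
    have hrem : PySem.List.remove? ip.2 p = some (ip.2.eraseIdx k) := by
      simp [PySem.List.remove?, hk2]
    rw [if_pos (Int.natCast_nonneg k)]
    simp only [hpop, hrem]
    rw [PySem.List.foldl_append_if (fun jp : Int × List String => ip.2.eraseIdx k == jp.2)
        (fun jp : Int × List String => (ip.1, jp.1)) (PySem.List.enumerate props) res]
    rw [pv_bucket (PySem.List.enumerate props) PySem.Dict.empty (ip.2.eraseIdx k),
        PySem.Dict.getD_empty]
    rw [PySem.List.foldl_append_singleton_eq_map (fun j : Int => (ip.1, j))]
    rw [pv_filter_map]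
    simp only [List.nil_append]
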